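-- pv_equiv track=rewrite | github.com/AllanKoder/Competitive-Programming-Training | cpp_training/digit_dp.py | solve
-- ===== SOURCE A (Python) =====
-- from functools import lru_cache
--
-- def solve(x):
--     if x <= 0:
--         return (1, 0)
--
--     stringed = str(x)
--     length = len(stringed)
--
--     @lru_cache(None)
--     def dp(n,c):
--         # returns (count, sum)
--         if n >= length:
--             return (1, 0)
--         sum_output = 0
--
--         limit = int(stringed[n]) if c else 9
--         total_count = 0
--         for i in range(limit+1):
--             next_is_constrained = True if (c and i == limit) else False
--             new_count, new_sum = dp(n+1, next_is_constrained)
--             sum_output += (i * new_count) + new_sum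
--             total_count += new_count
--         return (total_count, sum_output)
--     return dp(0, True)
-- ===== SOURCE B (Python) =====
-- def solve(x):
--     if x <= 0:
--         return (1, 0)
--     total = 0
--     p = 1
--     while p <= x:
--         higher = x // (p * 10)
--         cur = (x // p) % 10
--         lower = x % p
--         total += higher * 45 * p + cur * (cur - 1) // 2 * p + cur * (lower + 1)
--         p *= 10
--     return (x + 1, total)
-- ===== Notes on version B (the rewrite author's own statement) =====
-- stated objective: simpler
-- what changed: Replaces the memoized recursive digit DP over str(x) by the identity that the count is one more than x, plus a short place-value loop that adds each decimal place's closed-form contribution to the digit-sum total, with no string conversion, recursion or cache.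
import Mathlib
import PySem

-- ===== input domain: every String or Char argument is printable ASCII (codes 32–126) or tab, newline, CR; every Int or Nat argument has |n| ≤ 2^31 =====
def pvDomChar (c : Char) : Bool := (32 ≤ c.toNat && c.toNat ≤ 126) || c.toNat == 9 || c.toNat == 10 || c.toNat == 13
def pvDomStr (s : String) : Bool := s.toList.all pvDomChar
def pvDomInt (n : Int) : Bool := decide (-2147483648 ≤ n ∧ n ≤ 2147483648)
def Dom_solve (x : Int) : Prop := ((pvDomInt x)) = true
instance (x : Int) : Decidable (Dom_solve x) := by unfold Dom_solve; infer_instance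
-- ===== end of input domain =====

-- B replaces A's memoized recursive digit DP over str(x) by a direct per-place arithmetic
-- sum (objective: simpler; the equivalence below is exact on all ints).

-- ===== PORT A =====
-- dp(n, c) of A; the for-loop over range(limit+1) is the -- the for-loop over range(limit+1) of dp(n, c), carrying the accumulators total_count (tc)
-- and sum_output (so); rF/rT are dp(n+1, False) / dp(n+1, True)
def dpLoopA (c : Bool) (limit : Int) (rF rT : Int × Int) :
    List Int → Int → Int → Int × Int
  | [], tc, so => (tc, so)
  | i :: rest, tc, so =>
    let nic : Bool := c && (i == limit)
    let r := if nic then rT else rF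
    dpLoopA c limit rF rT rest (tc + r.1) (so + (i * r.1 + r.2))

-- dp(n, c) of A. The two possible recursive results dp(n+1, False) and dp(n+1, True) are
-- computed once per level and reused across the loop iterations — this realizes A's
-- @lru_cache(None) memoization (each dp state is evaluated exactly once in Python too;
-- without it the literal call tree would be exponential in the digit count).
-- The `.getD` defaults are on branches the Python never reaches (the index n is in range,
-- and stringed[n] is a decimal digit char).
def dpA (s : List Char) (length : Nat) (n : Nat) (c : Bool) : Int × Int :=
  if hn : n ≥ length then (1, 0)
  else
    let limit : Int :=
      if c then (PySem.Int.ofChars? [(PySem.List.pyGet? s (n : Int)).getD ' ']).getD 0 else 9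
    let rF := dpA s length (n + 1) false
    let rT := dpA s length (n + 1) true
    dpLoopA c limit rF rT (PySem.List.pyRange 0 (limit + 1) 1) 0 0
termination_by length - n
decreasing_by all_goals omega

def solve (x : Int) : Int × Int :=
  if x ≤ 0 then (1, 0)
  else
    let stringed := PySem.Int.toChars x   -- str(x), as its list of characters (PySem.Int.toList_toStr)
    let length := stringed.length
    dpA stringed length 0 true

-- ===== PORT B =====
-- the while loop of Source B; `0 < p` in the guard is a totality guard only (p starts at 1 and is
-- only ever multiplied by 10, so it is always true when the Python loop runs)
def solveLoop (x : Int) (total : Int) (p : Int) : Int :=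
  if h : 0 < p ∧ p ≤ x then
    let higher := PySem.Int.floordiv x (p * 10)
    let cur := PySem.Int.mod (PySem.Int.floordiv x p) 10
    let lower := PySem.Int.mod x p
    solveLoop x
      (total + (higher * 45 * p + PySem.Int.floordiv (cur * (cur - 1)) 2 * p + cur * (lower + 1)))
      (p * 10)
  else total
termination_by (x + 1 - p).toNat
decreasing_by omega

def solve_alt (x : Int) : Int × Int :=
  if x ≤ 0 then (1, 0)
  else (x + 1, solveLoop x 0 1)

-- ===== PRECONDITION & SPEC =====
def Spec_solve (x : Int) (out : Int × Int) : Prop := out = solve_alt x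
instance (x : Int) (out : Int × Int) : Decidable (Spec_solve x out) := by unfold Spec_solve; infer_instance

-- ===== CLAIM (what is proved, stated in full; the proofs are below) =====
def Claim_equal_solve : Prop := ∀ (x : Int), Dom_solve x → Spec_solve x (solve x)

-- ===== LEMMAS AND PROOFS =====

-- digit sum of n (in base 10); structural fuel recursion so that `decide` can evaluate it
def SDf : Nat → Nat → Nat
  | 0, _ => 0
  | f + 1, n => if n = 0 then 0 else n % 10 + SDf f (n / 10)

def SD (n : Nat) : Nat := SDf n n

-- G n = Σ_{k < n} SD k  (so Σ_{k ≤ m} SD k = G (m+1))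
def G : Nat → Nat
  | 0 => 0
  | n + 1 => G n + SD n

-- Sf k = G (10^k): digit-sum total of one full block of 10^k numbers
def Sf : Nat → Nat
  | 0 => 0
  | k + 1 => 45 * 10 ^ k + 10 * Sf k

-- big-endian value of a digit list
def bv : List Nat → Nat
  | [] => 0
  | d :: t => d * 10 ^ t.length + bv t

theorem SDf_fuel (f : Nat) : ∀ g n, n ≤ f → n ≤ g → SDf f n = SDf g n := by
  induction f with
  | zero => intro g n h1 _; interval_cases n; cases g <;> simp [SDf]
  | succ f ih =>
    intro g n h1 h2
    match g, n with
    | g, 0 => cases g <;> simp [SDf]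
    | g + 1, n + 1 =>
      simp only [SDf, if_neg (Nat.succ_ne_zero n)]
      have := Nat.div_lt_self (Nat.succ_pos n) (by omega : 1 < 10)
      rw [ih g ((n + 1) / 10) (by omega) (by omega)]

theorem SD_eq (n : Nat) : SD n = n % 10 + SD (n / 10) := by
  match n with
  | 0 => simp [SD, SDf]
  | n + 1 =>
    show SDf (n + 1) (n + 1) = _
    simp only [SDf, if_neg (Nat.succ_ne_zero n)]
    have := Nat.div_lt_self (Nat.succ_pos n) (by omega : 1 < 10)
    rw [SDf_fuel n ((n + 1) / 10) ((n + 1) / 10) (by omega) le_rfl]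
    rfl

theorem SD_small {d : Nat} (hd : d < 10) : SD d = d := by
  rw [SD_eq, Nat.mod_eq_of_lt hd, Nat.div_eq_of_lt hd]
  simp [SD, SDf]

theorem SD_split {c r m : Nat} (hr : r < 10 ^ m) : SD (c * 10 ^ m + r) = SD c + SD r := by
  induction m generalizing c r with
  | zero =>
    interval_cases r
    simp [SD, SDf]
  | succ m ih =>
    rw [SD_eq]
    have h1 : (c * 10 ^ (m + 1) + r) % 10 = r % 10 := by
      rw [pow_succ, ← Nat.mul_assoc]
      omega
    have h2 : (c * 10 ^ (m + 1) + r) / 10 = c * 10 ^ m + r / 10 := by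
      rw [pow_succ, ← Nat.mul_assoc]
      rw [Nat.add_comm, Nat.add_mul_div_right _ _ (by omega : 0 < 10)]
      omega
    have h3 : r / 10 < 10 ^ m := by
      rw [Nat.div_lt_iff_lt_mul (by omega : 0 < 10)]
      rw [pow_succ] at hr; omega
    rw [h1, h2, ih h3, SD_eq (n := r)]
    omega

theorem G_block (c m j : Nat) (hj : j ≤ 10 ^ m) :
    G (c * 10 ^ m + j) = G (c * 10 ^ m) + j * SD c + G j := by
  induction j with
  | zero => simp [G]
  | succ j ih =>
    have hj' : j < 10 ^ m := by omega
    have : c * 10 ^ m + (j + 1) = (c * 10 ^ m + j) + 1 := by omega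
    rw [this]
    show G (c * 10 ^ m + j) + SD (c * 10 ^ m + j) = _
    rw [ih (by omega), SD_split hj']
    show _ = _ + (G j + SD j)
    ring

theorem G_full' (c m : Nat) : G (c * 10 ^ m) = 10 ^ m * G c + c * G (10 ^ m) := by
  induction c with
  | zero => simp [G]
  | succ c ih =>
    have : (c + 1) * 10 ^ m = c * 10 ^ m + 10 ^ m := by ring
    rw [this, G_block c m (10 ^ m) le_rfl, ih]
    show _ = 10 ^ m * (G c + SD c) + _
    ring

theorem Sf_eq (k : Nat) : Sf k = G (10 ^ k) := by
  induction k with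
  | zero => decide
  | succ k ih =>
    have : (10 : Nat) ^ (k + 1) = 10 * 10 ^ k := by ring
    rw [this, G_full' 10 k]
    show 45 * 10 ^ k + 10 * Sf k = _
    have h10 : G 10 = 45 := by decide
    rw [h10, ih]
    ring

theorem G_full (c m : Nat) : G (c * 10 ^ m) = 10 ^ m * G c + c * Sf m := by
  rw [G_full', Sf_eq]

theorem G_key {c m v : Nat} (hv : v < 10 ^ m) :
    G (c * 10 ^ m + v + 1) = 10 ^ m * G c + c * Sf m + (v + 1) * SD c + G (v + 1) := by
  have : c * 10 ^ m + v + 1 = c * 10 ^ m + (v + 1) := by omega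
  rw [this, G_block c m (v + 1) (by omega), G_full]

theorem G_small {d : Nat} (hd : d < 10) : G d = d * (d - 1) / 2 := by
  interval_cases d <;> decide

-- str(n) for n > 0 is the big-endian digit characters
theorem toDigitsCore_eq (fuel : Nat) : ∀ (n : Nat) (l : List Char), 0 < n → n ≤ fuel →
    Nat.toDigitsCore 10 fuel n l = ((Nat.digits 10 n).map Nat.digitChar).reverse ++ l := by
  induction fuel with
  | zero => intro n l h0 hf; omega
  | succ fuel ih =>
    intro n l h0 hf
    rw [Nat.toDigitsCore]
    by_cases h : n / 10 = 0
    · have hn : n < 10 := by omega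
      rw [if_pos h, Nat.digits_def' (by omega : 1 < 10) h0, h,
        Nat.digits_zero, Nat.mod_eq_of_lt hn]
      simp
    · rw [if_neg h, ih (n / 10) _ (by omega) (by
        have := Nat.div_lt_self h0 (by omega : 1 < 10); omega)]
      rw [Nat.digits_def' (by omega : 1 < 10) h0]
      simp

theorem digitChar_int {d : Nat} (hd : d < 10) :
    PySem.Int.ofChars? [Nat.digitChar d] = some (d : Int) := by
  interval_cases d <;> decide

theorem bv_lt {ds : List Nat} (h : ∀ d ∈ ds, d < 10) : bv ds < 10 ^ ds.length := by
  induction ds with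
  | nil => simp [bv]
  | cons d t ih =>
    have hd : d < 10 := h d (by simp)
    have ht := ih (fun e he => h e (by simp [he]))
    show d * 10 ^ t.length + bv t < 10 ^ (t.length + 1)
    rw [pow_succ]
    nlinarith

theorem bv_append (xs : List Nat) (d : Nat) : bv (xs ++ [d]) = 10 * bv xs + d := by
  induction xs with
  | nil => simp [bv]
  | cons e t ih =>
    show e * 10 ^ (t ++ [d]).length + bv (t ++ [d]) = 10 * (e * 10 ^ t.length + bv t) + d
    rw [ih]
    simp [List.length_append, pow_succ]
    ring

theorem bv_reverse (l : List Nat) : bv l.reverse = Nat.ofDigits 10 l := by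
  induction l with
  | nil => simp [bv, Nat.ofDigits]
  | cons d t ih =>
    rw [List.reverse_cons, bv_append, ih, Nat.ofDigits_cons]
    ring

theorem range_sum2 (d : Nat) : 2 * (List.range d).sum = d * (d - 1) := by
  induction d with
  | zero => rfl
  | succ d ih =>
    rw [List.range_succ, List.sum_append, Nat.mul_add, ih]
    cases d with
    | zero => rfl
    | succ n => simp [List.sum_cons]; ring

theorem range_sum (d : Nat) : (List.range d).sum = d * (d - 1) / 2 := by
  have := range_sum2 d
  omega

theorem loopA_eval (limit : Int) (rF rT : Int × Int) :
    ∀ (l : List Int) (tc so : Int), (∀ i ∈ l, i ≠ limit) →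
    dpLoopA true limit rF rT (l ++ [limit]) tc so
      = (tc + (l.length : Int) * rF.1 + rT.1,
         so + l.sum * rF.1 + (l.length : Int) * rF.2 + (limit * rT.1 + rT.2)) := by
  intro l
  induction l with
  | nil =>
    intro tc so _
    simp [dpLoopA]
  | cons i l' ih =>
    intro tc so hne
    have hil : (i == limit) = false := by
      simp only [beq_eq_false_iff_ne, ne_eq]
      exact hne i (by simp)
    simp only [List.cons_append, dpLoopA, Bool.true_and, hil, if_neg, Bool.false_eq_true,
      not_false_eq_true]
    rw [ih _ _ (fun e he => hne e (by simp [he]))]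
    simp only [List.length_cons, List.sum_cons, Prod.mk.injEq]
    push_cast
    constructor <;> ring

-- dp correctness, by induction on the digit suffix
theorem dpA_correct (ds₂ : List Nat) : ∀ ds₁ : List Nat,
    (∀ d ∈ ds₁ ++ ds₂, d < 10) →
    (dpA ((ds₁ ++ ds₂).map Nat.digitChar) (ds₁ ++ ds₂).length ds₁.length false
        = ((10 : Int) ^ ds₂.length, (Sf ds₂.length : Int)))
    ∧ (dpA ((ds₁ ++ ds₂).map Nat.digitChar) (ds₁ ++ ds₂).length ds₁.length true
        = ((bv ds₂ : Int) + 1, (G (bv ds₂ + 1) : Int))) := by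
  induction ds₂ with
  | nil =>
    intro ds₁ _
    constructor <;>
      rw [dpA, dif_pos (by simp)] <;>
      norm_num [Sf, bv, G, SD, SDf]
  | cons d t ih =>
    intro ds₁ h
    have hd : d < 10 := h d (by simp)
    have key := ih (ds₁ ++ [d]) (by
      intro e he
      apply h
      simpa [List.append_assoc] using he)
    rw [List.append_assoc] at key
    simp only [List.singleton_append, List.length_append, List.length_cons,
      List.length_nil, Nat.zero_add] at key
    obtain ⟨ihf, iht⟩ := key
    have hguard : ¬ ds₁.length ≥ (ds₁ ++ d :: t).length := by simp
    have hget : PySem.List.pyGet? ((ds₁ ++ d :: t).map Nat.digitChar)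
        ((ds₁.length : Nat) : Int) = some (Nat.digitChar d) := by
      rw [List.map_append, List.map_cons,
        show (ds₁.length : Int) = ((ds₁.map Nat.digitChar).length : Int) by simp]
      exact PySem.List.pyGet?_append_length (ds₁.map Nat.digitChar) (t.map Nat.digitChar)
        (Nat.digitChar d)
    have hvt : bv t < 10 ^ t.length := bv_lt (fun e he => h e (by simp [he]))
    have hkey := G_key (c := d) (m := t.length) hvt
    rw [G_small hd, SD_small hd] at hkey
    constructor
    · -- c = false: limit is 9, the loop runs over range(10)
      rw [dpA, dif_neg hguard]
      show dpLoopA false 9 _ _ (PySem.List.pyRange 0 (9 + 1) 1) 0 0 = _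
      rw [show PySem.List.pyRange 0 (9 + 1) 1 = [0,1,2,3,4,5,6,7,8,9] from by decide]
      simp only [List.length_append, List.length_cons] at ihf ⊢
      simp only [dpLoopA, Bool.false_and, Bool.false_eq_true, not_false_eq_true,
        if_neg, ihf, Prod.mk.injEq]
      rw [show Sf (t.length + 1) = 45 * 10 ^ t.length + 10 * Sf t.length from rfl]
      push_cast
      constructor <;> ring
    · -- c = true: limit is the digit d
      rw [dpA, dif_neg hguard]
      show dpLoopA true
        ((PySem.Int.ofChars? [(PySem.List.pyGet? ((ds₁ ++ d :: t).map Nat.digitChar)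
            ((ds₁.length : Nat) : Int)).getD ' ']).getD 0) _ _
        (PySem.List.pyRange 0 (((PySem.Int.ofChars? [(PySem.List.pyGet?
            ((ds₁ ++ d :: t).map Nat.digitChar) ((ds₁.length : Nat) : Int)).getD ' ']).getD 0) + 1) 1)
        0 0 = _
      rw [hget]
      simp only [Option.getD_some]
      rw [digitChar_int hd]
      simp only [Option.getD_some]
      rw [show bv (d :: t) = d * 10 ^ t.length + bv t from rfl]
      simp only [List.length_append, List.length_cons] at ihf iht ⊢
      rw [PySem.List.pyRange_one_succ_right (by positivity : (0 : Int) ≤ (d : Int))]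
      rw [ihf, iht, loopA_eval _ _ _ _ 0 0 (fun i hi => by
        rw [PySem.List.mem_pyRange_one] at hi
        omega)]
      have hlen : (((PySem.List.pyRange 0 (d : Int) 1).length : Nat) : Int) = (d : Int) := by
        rw [PySem.List.length_pyRange_one]
        omega
      have hsum : (PySem.List.pyRange 0 (d : Int) 1).sum = ((d * (d - 1) / 2 : Nat) : Int) := by
        rw [show (PySem.List.pyRange 0 (d : Int) 1).sum = ((List.range d).sum : Int) from by
          rw [PySem.List.pyRange_one]; simp]
        rw [range_sum]
      rw [hlen, hsum, hkey, Prod.mk.injEq]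
      push_cast
      constructor <;> ring

theorem solveA_val {m : Nat} (hm : 0 < m) : solve (m : Int) = ((m : Int) + 1, (G (m + 1) : Int)) := by
  rw [solve, if_neg (by omega)]
  show dpA (PySem.Int.toChars (m : Int)) (PySem.Int.toChars (m : Int)).length 0 true = _
  have hchars : PySem.Int.toChars (m : Int)
      = ((Nat.digits 10 m).reverse.map Nat.digitChar) := by
    rw [PySem.Int.toChars, if_neg (by omega), Int.toNat_natCast, Nat.toDigits,
      toDigitsCore_eq (m + 1) m [] hm (by omega)]
    simp [List.map_reverse]
  rw [hchars]
  have h := (dpA_correct ((Nat.digits 10 m).reverse) [] (by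
    intro e he
    simp only [List.nil_append, List.mem_reverse] at he
    exact Nat.digits_lt_base (by omega) he)).2
  simp only [List.nil_append, List.length_nil] at h
  rw [List.length_map, h, bv_reverse, Nat.ofDigits_digits]

theorem solveLoop_stop {m k : Nat} (total : Int) (h : m < 10 ^ k) :
    solveLoop (m : Int) total ((10 : Int) ^ k)
      = total + (G (m + 1) : Int) - ((m / 10 ^ k) * Sf k + G (m % 10 ^ k + 1) : Nat) := by
  rw [solveLoop]
  rw [dif_neg (by
    rw [show ((10:Int)) ^ k = ((10 ^ k : Nat) : Int) from by push_cast; ring]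
    omega)]
  rw [Nat.div_eq_of_lt h, Nat.mod_eq_of_lt h]
  push_cast
  ring

theorem floordiv_sq {d : Nat} (hd : d < 10) :
    PySem.Int.floordiv ((d : Int) * ((d : Int) - 1)) 2 = ((d * (d - 1) / 2 : Nat) : Int) := by
  interval_cases d <;> decide

theorem solveLoop_val {m : Nat} (j : Nat) : ∀ (k : Nat) (total : Int), m < 10 ^ (k + j) →
    solveLoop (m : Int) total ((10 : Int) ^ k)
      = total + (G (m + 1) : Int) - ((m / 10 ^ k) * Sf k + G (m % 10 ^ k + 1) : Nat) := by
  induction j with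
  | zero => intro k total h; exact solveLoop_stop total (by omega)
  | succ j ih =>
    intro k total h
    by_cases hk : 10 ^ k ≤ m
    · have e2 : (10 : Int) ^ k = ((10 ^ k : Nat) : Int) := by push_cast; ring
      have hd : m / 10 ^ k % 10 < 10 := Nat.mod_lt _ (by omega)
      rw [solveLoop, e2]
      rw [dif_pos (by constructor
                      · exact_mod_cast pow_pos (by omega : (0:Nat) < 10) k
                      · exact_mod_cast hk)]
      have e1 : ((10 ^ k : Nat) : Int) * 10 = ((10 ^ (k + 1) : Nat) : Int) := by push_cast; ring
      have emod10 : ∀ a : Nat, PySem.Int.mod ((a : Nat) : Int) 10 = ((a % 10 : Nat) : Int) := by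
        intro a; exact_mod_cast PySem.Int.mod_natCast a 10
      simp only [e1, PySem.Int.floordiv_natCast, PySem.Int.mod_natCast, emod10,
        floordiv_sq hd]
      have ih' := ih (k + 1) (total +
          (((m / 10 ^ (k + 1) : Nat) : Int) * 45 * ((10 ^ k : Nat) : Int) +
            ((m / 10 ^ k % 10 * (m / 10 ^ k % 10 - 1) / 2 : Nat) : Int) * ((10 ^ k : Nat) : Int) +
            ((m / 10 ^ k % 10 : Nat) : Int) * (((m % 10 ^ k : Nat) : Int) + 1)))
        (by rw [show k + 1 + j = k + (j + 1) from by omega]; exact h)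
      rw [show ((10:Int)) ^ (k + 1) = ((10 ^ (k + 1) : Nat) : Int) from by push_cast; ring] at ih'
      rw [ih']
      -- reduce to a Nat identity about the place-k contribution
      have hv : m % 10 ^ k < 10 ^ k := Nat.mod_lt _ (by positivity)
      have hkey : G (m % 10 ^ (k + 1) + 1)
          = 10 ^ k * G (m / 10 ^ k % 10) + (m / 10 ^ k % 10) * Sf k
            + (m % 10 ^ k + 1) * SD (m / 10 ^ k % 10) + G (m % 10 ^ k + 1) := by
        have hm : m % 10 ^ (k + 1) = (m / 10 ^ k % 10) * 10 ^ k + m % 10 ^ k := by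
          rw [Nat.mod_pow_succ]; ring
        rw [hm]
        exact G_key hv
      rw [G_small hd, SD_small hd] at hkey
      have hdiv : m / 10 ^ (k + 1) * 10 + m / 10 ^ k % 10 = m / 10 ^ k := by
        rw [pow_succ, ← Nat.div_div_eq_div_mul m (10 ^ k) 10]
        omega
      have hnat : (m / 10 ^ k) * Sf k + G (m % 10 ^ k + 1)
            + ((m / 10 ^ (k + 1)) * 45 * 10 ^ k
               + (m / 10 ^ k % 10) * ((m / 10 ^ k % 10) - 1) / 2 * 10 ^ k
               + (m / 10 ^ k % 10) * (m % 10 ^ k + 1))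
          = (m / 10 ^ (k + 1)) * Sf (k + 1) + G (m % 10 ^ (k + 1) + 1) := by
        rw [hkey]
        show _ = _ * (45 * 10 ^ k + 10 * Sf k) + _
        set q := m / 10 ^ k with hq
        set d := q % 10 with hdd
        set v := m % 10 ^ k with hvv
        set h1 := m / 10 ^ (k + 1) with hh1
        rw [← hdiv]
        ring
      zify at hnat
      push_cast
      linarith [hnat]
    · exact solveLoop_stop total (by omega)

theorem solveB_val' (m : Nat) : solveLoop (m : Int) 0 1 = (G (m + 1) : Int) := by
  have h := solveLoop_val (m := m) (m + 1) 0 0 (by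
    simpa using Nat.lt_pow_self (by omega : 1 < 10) (n := m + 1) |>.trans_le' (by omega))
  simp only [pow_zero] at h
  rw [h]
  simp [Sf, G, SD, SDf, Nat.mod_one]

theorem solveB_val {m : Nat} (hm : 0 < m) : solve_alt (m : Int) = ((m : Int) + 1, (G (m + 1) : Int)) := by
  rw [solve_alt, if_neg (by omega), solveB_val' m]

-- ===== VERDICT (by name: the statement is the Claim_ definition above) =====
theorem solve_spec : Claim_equal_solve := by
  intro x _
  unfold Spec_solve
  by_cases hx : x ≤ 0
  · simp [solve, solve_alt, hx]
  · have hm : 0 < x.toNat := by omega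
    have hxx : x = (x.toNat : Int) := by omega
    rw [hxx, solveA_val hm, solveB_val hm]
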